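-- pv_equiv track=rewrite | github.com/marlonlop/codesignal | sort_by_height.py | solution
-- ===== SOURCE A (Python) =====
-- def solution(a):
--     sorted_heights = sorted([height for height in a if height != -1])
--     person_index = 0
--
--     for i in range(len(a)):
--         if a[i] != -1:
--             a[i] = sorted_heights[person_index]
--             person_index += 1
--     return a
-- ===== SOURCE B (Python) =====
-- def solution(a):
--     pool = [v for v in a if v != -1]
--     out = []
--     for v in a:
--         if v == -1:
--             out.append(-1)
--         else:
--             m = min(pool)
--             pool.remove(m)
--             out.append(m)
--     a[:] = out
--     return a
-- ===== Notes on version B (the rewrite author's own statement) =====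
-- stated objective: alternative
-- what changed: B never sorts: instead of A's sort-then-redistribute with a running counter, B builds the result in one pass over the list by repeatedly extracting the minimum from a shrinking pool of the non-(-1) values (selection-style), then splices it back in place.
import Mathlib
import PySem

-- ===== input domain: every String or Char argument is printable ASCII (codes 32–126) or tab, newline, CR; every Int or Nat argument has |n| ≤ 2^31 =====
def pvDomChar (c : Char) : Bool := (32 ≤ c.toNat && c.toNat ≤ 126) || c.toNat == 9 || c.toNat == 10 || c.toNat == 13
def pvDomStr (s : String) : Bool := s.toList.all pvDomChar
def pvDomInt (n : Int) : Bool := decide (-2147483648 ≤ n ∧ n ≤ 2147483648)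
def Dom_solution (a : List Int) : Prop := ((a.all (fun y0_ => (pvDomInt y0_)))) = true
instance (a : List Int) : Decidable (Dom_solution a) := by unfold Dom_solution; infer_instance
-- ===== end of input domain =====

-- B replaces A's sort-then-redistribute (with its running counter) by one pass over the list
-- that repeatedly extracts the minimum of a shrinking pool of the non-(-1) values; both
-- Pythons mutate the argument in place, the theorems below are about the returned value.

-- ===== PORT A =====
def solution (a : List Int) : List Int :=
  let sorted_heights := PySem.List.sorted (a.filter (fun height => height ≠ -1)) (fun x => x) false
  -- for i in range(len(a)): state = (current list, person_index)
  let st := (PySem.List.pyRange 0 a.length 1).foldl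
    (fun (st : List Int × Int) i =>
      if PySem.List.pyGetD st.1 i 0 ≠ -1 then
        (PySem.List.pySetD st.1 i (PySem.List.pyGetD sorted_heights st.2 0), st.2 + 1)
      else st) (a, 0)
  st.1

-- ===== PORT B =====
-- the 'for v in a' loop of Source B: builds out front-to-back, carrying the pool of
-- not-yet-placed non-(-1) values; each non-(-1) slot takes min(pool) and removes it
def extractMin : List Int → List Int → List Int
  | [], _ => []
  | v :: rest, pool =>
    if v = -1 then -1 :: extractMin rest pool
    else
      match PySem.List.min? pool (fun x => x) with
      | some m => m :: extractMin rest ((PySem.List.remove? pool m).getD pool)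
      | none => v :: extractMin rest pool   -- never reached: pool holds one value per remaining non-(-1) slot

def solution_alt (a : List Int) : List Int :=
  let pool := a.filter (fun v => v ≠ -1)
  extractMin a pool

-- ===== PRECONDITION & SPEC =====
def Spec_solution (a : List Int) (out : List Int) : Prop := out = solution_alt a
instance (a : List Int) (out : List Int) : Decidable (Spec_solution a out) := by unfold Spec_solution; infer_instance

-- ===== CLAIM (what is proved, stated in full; the proofs are below) =====
def Claim_equal_solution : Prop := ∀ (a : List Int), Dom_solution a → Spec_solution a (solution a)

-- ===== LEMMAS AND PROOFS =====

-- proof device: filling the non-(-1) slots of a list front-to-back from a value list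
def fillIter : List Int → List Int → List Int
  | [], _ => []
  | v :: rest, vals =>
    if v = -1 then v :: fillIter rest vals
    else
      match vals with
      | w :: ws => w :: fillIter rest ws
      | [] => v :: fillIter rest []

theorem countP_ne_eq (l : List Int) :
    l.countP (fun v => decide (v ≠ -1)) = l.countP (fun v => !decide (v = -1)) := by
  simp [decide_not]

theorem fillIter_cons_skip (rest vals : List Int) :
    fillIter (-1 :: rest) vals = -1 :: fillIter rest vals := by
  simp [fillIter]

theorem fillIter_cons_take {v : Int} (hv : ¬ v = -1) (rest w ws) :
    fillIter (v :: rest) (w :: ws) = w :: fillIter rest ws := by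
  simp [fillIter, hv]

-- the sorted order named: sorted(pool) = min(pool) :: sorted(pool with that min removed)
theorem sorted_min_cons {pool : List Int} {m : Int}
    (hm : PySem.List.min? pool (fun x => x) = some m) :
    PySem.List.sorted pool (fun x => x) false
      = m :: PySem.List.sorted (pool.erase m) (fun x => x) false := by
  have hmem : m ∈ pool := PySem.List.min?_mem hm
  have hmin : ∀ y ∈ pool, m ≤ y := by
    intro y hy; exact PySem.List.min?_isMin hm y hy
  apply PySem.List.sorted_id_eq_of_perm_of_pairwise
  · exact ((PySem.List.sorted_perm (pool.erase m) (fun x => x) false).cons m).trans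
      (List.perm_cons_erase hmem).symm
  · refine List.pairwise_cons.mpr ⟨?_, PySem.List.sorted_pairwise (pool.erase m) (fun x => x)⟩
    intro y hy
    exact hmin y (List.mem_of_mem_erase ((PySem.List.mem_sorted _ _ _ _).1 hy))

-- B's pass equals filling with the sorted pool, as long as the pool has one value per non-(-1) slot
theorem extract_eq_fill : ∀ (b pool : List Int),
    b.countP (fun v => !decide (v = -1)) = pool.length →
    extractMin b pool = fillIter b (PySem.List.sorted pool (fun x => x) false) := by
  intro b
  induction b with
  | nil => intro pool _; simp [extractMin, fillIter]
  | cons v rest ih =>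
    intro pool hcnt
    by_cases hv : v = -1
    · subst hv
      rw [fillIter_cons_skip]
      simp only [extractMin]
      exact congrArg _ (ih pool (by rw [← hcnt, List.countP_cons]; simp))
    · have hpos : 0 < pool.length := by
        rw [← hcnt, List.countP_cons]; simp [hv]
      have hne : pool ≠ [] := by intro h; simp [h] at hpos
      obtain ⟨m, hm⟩ : ∃ m, PySem.List.min? pool (fun x => x) = some m := by
        cases hmm : PySem.List.min? pool (fun x => x) with
        | none => exact absurd ((PySem.List.min?_eq_none_iff _ _).1 hmm) hne
        | some m => exact ⟨m, rfl⟩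
      have hmem : m ∈ pool := PySem.List.min?_mem hm
      have hrm : PySem.List.remove? pool m = some (pool.erase m) :=
        PySem.List.remove?_eq_some_erase pool m hmem
      rw [sorted_min_cons hm, fillIter_cons_take hv]
      simp only [extractMin, if_neg hv, hm, hrm, Option.getD_some]
      refine congrArg _ (ih (pool.erase m) ?_)
      have hlen : (pool.erase m).length = pool.length - 1 := List.length_erase_of_mem hmem
      have hc : List.countP (fun v => !decide (v = -1)) rest + 1 = pool.length := by
        rw [← hcnt, List.countP_cons]; simp [hv]
      omega

-- the loop invariant for A: folding the step over indices j..len from state (b, k) yields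
-- the prefix of b up to j followed by the fill of the suffix with the remaining values
theorem loop_eq_fill (vals : List Int) (n : Nat) :
    ∀ (b : List Int) (j k : Nat), b.length = j + n →
      k + (b.drop j).countP (fun v => !decide (v = -1)) ≤ vals.length →
      ((PySem.List.pyRange (j : Int) (b.length : Int) 1).foldl
        (fun (st : List Int × Int) i =>
          if PySem.List.pyGetD st.1 i 0 ≠ -1 then
            (PySem.List.pySetD st.1 i (PySem.List.pyGetD vals st.2 0), st.2 + 1)
          else st) (b, (k : Int))).1
      = b.take j ++ fillIter (b.drop j) (vals.drop k) := by
  induction n with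
  | zero =>
      intro b j k hlen _
      have hj : j = b.length := by omega
      subst hj
      simp [PySem.List.pyRange_one_eq_nil le_rfl, fillIter]
  | succ n ih =>
      intro b j k hlen hk
      have hjlt : j < b.length := by omega
      have hcons : PySem.List.pyRange (j : Int) (b.length : Int) 1
          = (j : Int) :: PySem.List.pyRange ((j : Int) + 1) (b.length : Int) 1 :=
        PySem.List.pyRange_one_cons (by exact_mod_cast hjlt)
      have hdropj : b.drop j = b[j] :: b.drop (j + 1) := List.drop_eq_getElem_cons hjlt
      have hget : PySem.List.pyGetD b (j : Int) 0 = b[j] := by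
        simp [PySem.List.pyGetD_natCast, List.getD_eq_getElem?_getD, hjlt]
      rw [hcons, List.foldl_cons]
      by_cases hval : b[j] = -1
      · -- branch not taken: a[j] == -1
        have hstep : (if PySem.List.pyGetD b (j : Int) 0 ≠ -1 then
            (PySem.List.pySetD b (j : Int) (PySem.List.pyGetD vals (k : Int) 0), (k : Int) + 1)
          else (b, (k : Int))) = (b, (k : Int)) := by
          simp [hget, hval]
        rw [hstep]
        have hcount : (b.drop j).countP (fun v => !decide (v = -1))
            = (b.drop (j+1)).countP (fun v => !decide (v = -1)) := by
          rw [hdropj, List.countP_cons]; simp [hval]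
        have hres := ih b (j+1) k (by omega) (by omega)
        rw [show ((j : Int) + 1) = ((j + 1 : Nat) : Int) by push_cast; ring, hres]
        have htake : b.take (j+1) = b.take j ++ [b[j]] := by
          rw [List.take_succ, List.getElem?_eq_getElem hjlt]; rfl
        rw [hdropj, htake, show (b[j] : Int) = -1 from hval, fillIter_cons_skip]
        simp
      · -- branch taken: assign vals[k], counter +1
        have hklt : k < vals.length := by
          have h1 : (b.drop j).countP (fun v => !decide (v = -1))
              = ((b.drop (j+1)).countP (fun v => !decide (v = -1))) + 1 := by
            rw [hdropj, List.countP_cons]; simp [hval]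
          omega
        have hvget : PySem.List.pyGetD vals (k : Int) 0 = vals[k] := by
          simp [PySem.List.pyGetD_natCast, List.getD_eq_getElem?_getD, hklt]
        have hstep : (if PySem.List.pyGetD b (j : Int) 0 ≠ -1 then
            (PySem.List.pySetD b (j : Int) (PySem.List.pyGetD vals (k : Int) 0), (k : Int) + 1)
          else (b, (k : Int))) = (b.set j vals[k], (k : Int) + 1) := by
          rw [if_pos (by simp [hget, hval]), hvget, PySem.List.pySetD_natCast]
        rw [hstep]
        set b' := b.set j vals[k] with hb'
        have hlen' : b'.length = (j + 1) + n := by simp [hb']; omega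
        have hdrop' : b'.drop (j+1) = b.drop (j+1) := by
          simp [hb', List.drop_set]
        have hcount : (b.drop j).countP (fun v => !decide (v = -1))
            = ((b.drop (j+1)).countP (fun v => !decide (v = -1))) + 1 := by
          rw [hdropj, List.countP_cons]; simp [hval]
        have hres := ih b' (j+1) (k+1) hlen' (by rw [hdrop']; omega)
        rw [show b.length = b'.length by simp [hb'],
            show ((j : Int) + 1) = ((j + 1 : Nat) : Int) by push_cast; ring,
            show ((k : Int) + 1) = ((k + 1 : Nat) : Int) by push_cast; ring, hres]
        have htake' : b'.take (j+1) = b.take j ++ [vals[k]] := by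
          have hjlt' : j < b'.length := by omega
          have hbj : b'[j] = vals[k] := by simp [hb', List.getElem_set_self]
          rw [List.take_succ, List.getElem?_eq_getElem hjlt']
          rw [show b'.take j = b.take j by
            rw [hb', List.take_set]
            exact List.set_eq_of_length_le (by rw [List.length_take]; omega)]
          rw [hbj]; rfl
        have hdropk : vals.drop k = vals[k] :: vals.drop (k+1) := List.drop_eq_getElem_cons hklt
        rw [htake', hdrop', hdropk, hdropj, fillIter_cons_take hval]
        simp

-- ===== VERDICT (by name: the statement is the Claim_ definition above) =====
theorem solution_spec : Claim_equal_solution := by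
  intro a _
  show solution a = solution_alt a
  unfold solution solution_alt
  set pool := a.filter (fun v => v ≠ -1) with hp
  set vals := PySem.List.sorted pool (fun x => x) false with hv
  have hcnt : a.countP (fun v => !decide (v = -1)) = pool.length := by
    rw [← countP_ne_eq, hp, ← List.countP_eq_length_filter]
  have hvlen : vals.length = pool.length := by
    rw [hv, PySem.List.length_sorted]
  have hres := loop_eq_fill vals a.length a 0 0 (by omega) (by simp; omega)
  simp only [Int.natCast_zero] at hres
  simp only [List.take_zero, List.drop_zero, List.nil_append] at hres
  rw [hres, extract_eq_fill a pool (by omega)]
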